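-- pv_equiv track=rewrite | github.com/sat-diff-analysis/differential-sat-encoding | SAT SOLVING-ENCODING COMPARISON/PRESENT/Present_CNF.py | CountClausesInobjectivefunction
-- ===== SOURCE A (Python) =====
-- def CountClausesInobjectivefunction(main_var_num, cardinalitycons, clause_num):
--     count = clause_num
--     #number of variable used for probability:
--     n = main_var_num
--     # objective function <=k
--     k = cardinalitycons
--     if (k > 0):
--         count += 1
--         for j in range(1, k):
--             count += 1
--         for i in range(1, n-1):
--             count += 3
--         for j in range(1, k):
--             for i in range(1, n-1):
--                 count += 2
--         count += 1
--     if (k == 0):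
--         for i in range(n):
--             count += 1
--     return count
-- ===== SOURCE B (Python) =====
-- def CountClausesInobjectivefunction(main_var_num, cardinalitycons, clause_num):
--     # closed-form arithmetic: no loops
--     n = main_var_num
--     k = cardinalitycons
--     if k > 0:
--         return clause_num + 2 + (k - 1) + (3 + 2 * (k - 1)) * max(n - 2, 0)
--     if k == 0:
--         return clause_num + max(n, 0)
--     return clause_num
-- ===== Notes on version B (the rewrite author's own statement) =====
-- stated objective: faster
-- what changed: Replaced the nested constant-increment loops with a closed-form arithmetic formula.
import Mathlib
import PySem

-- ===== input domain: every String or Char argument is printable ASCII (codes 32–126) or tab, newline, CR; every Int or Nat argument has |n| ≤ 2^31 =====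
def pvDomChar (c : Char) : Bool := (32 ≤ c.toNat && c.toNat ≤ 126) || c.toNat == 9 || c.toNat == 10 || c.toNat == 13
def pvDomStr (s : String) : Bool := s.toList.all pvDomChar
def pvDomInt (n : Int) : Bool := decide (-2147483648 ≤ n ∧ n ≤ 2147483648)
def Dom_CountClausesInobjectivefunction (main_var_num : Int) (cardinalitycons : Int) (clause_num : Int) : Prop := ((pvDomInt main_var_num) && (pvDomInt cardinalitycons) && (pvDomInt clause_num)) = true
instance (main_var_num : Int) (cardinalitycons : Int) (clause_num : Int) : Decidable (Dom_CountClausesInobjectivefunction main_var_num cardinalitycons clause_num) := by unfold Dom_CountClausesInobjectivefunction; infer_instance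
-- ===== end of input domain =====

-- ===== PORT A =====
-- B replaces the nested constant-increment loops with a closed-form formula (objective: faster).
def CountClausesInobjectivefunction (main_var_num : Int) (cardinalitycons : Int) (clause_num : Int) : Int :=
  let count := clause_num
  let n := main_var_num
  let k := cardinalitycons
  let count :=
    if k > 0 then
      let count := count + 1
      let count := (PySem.List.pyRange 1 k 1).foldl (fun acc _ => acc + 1) count
      let count := (PySem.List.pyRange 1 (n - 1) 1).foldl (fun acc _ => acc + 3) count
      let count := (PySem.List.pyRange 1 k 1).foldl
        (fun acc _ => (PySem.List.pyRange 1 (n - 1) 1).foldl (fun acc2 _ => acc2 + 2) acc) count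
      count + 1
    else count
  if k = 0 then (PySem.List.pyRange 0 n 1).foldl (fun acc _ => acc + 1) count else count

-- ===== PORT B =====
def CountClausesInobjectivefunction_alt (main_var_num : Int) (cardinalitycons : Int) (clause_num : Int) : Int :=
  if cardinalitycons > 0 then
    clause_num + 2 + (cardinalitycons - 1)
      + (3 + 2 * (cardinalitycons - 1)) * max (main_var_num - 2) 0
  else if cardinalitycons = 0 then clause_num + max main_var_num 0
  else clause_num

-- ===== PRECONDITION & SPEC =====
def Spec_CountClausesInobjectivefunction (main_var_num : Int) (cardinalitycons : Int) (clause_num : Int) (out : Int) : Prop := out = CountClausesInobjectivefunction_alt main_var_num cardinalitycons clause_num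
instance (main_var_num : Int) (cardinalitycons : Int) (clause_num : Int) (out : Int) : Decidable (Spec_CountClausesInobjectivefunction main_var_num cardinalitycons clause_num out) := by unfold Spec_CountClausesInobjectivefunction; infer_instance

-- ===== CLAIM (what is proved, stated in full; the proofs are below) =====
def Claim_equal_CountClausesInobjectivefunction : Prop := ∀ (main_var_num : Int) (cardinalitycons : Int) (clause_num : Int), Dom_CountClausesInobjectivefunction main_var_num cardinalitycons clause_num → Spec_CountClausesInobjectivefunction main_var_num cardinalitycons clause_num (CountClausesInobjectivefunction main_var_num cardinalitycons clause_num)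

-- ===== LEMMAS AND PROOFS =====

-- ===== VERDICT (by name: the statement is the Claim_ definition above) =====
lemma pv_foldl_const {α : Type} (l : List α) (d : Int) (a : Int) :
    l.foldl (fun acc _ => acc + d) a = a + d * l.length := by
  induction l generalizing a with
  | nil => simp
  | cons x xs ih => simp [List.foldl, ih]; ring

theorem CountClausesInobjectivefunction_spec : Claim_equal_CountClausesInobjectivefunction := by
  intro n k c _
  unfold Spec_CountClausesInobjectivefunction
  unfold CountClausesInobjectivefunction CountClausesInobjectivefunction_alt
  simp only [pv_foldl_const, PySem.List.length_pyRange_one]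
  by_cases hk : k > 0
  · have h1 : ((k - 1).toNat : Int) = k - 1 := by omega
    have h2 : ((n - 1 - 1).toNat : Int) = max (n - 2) 0 := by omega
    simp only [hk, if_pos, if_neg (by omega : ¬ k = 0)]
    simp only [h1, h2]
    ring
  · simp only [if_neg hk]
    by_cases hk0 : k = 0
    · simp [hk0]
    · simp [hk0]
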